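-- pv_equiv track=rewrite | github.com/Resecon-Lee/scripts | multi_instance_analysis.py | categorize_topics
-- ===== SOURCE A (Python) =====
-- from collections import Counter, defaultdict
--
-- def categorize_topics(topics):
--     """Categorize topics into business areas"""
--     categories = {
--         'Employment & HR': ['employment', 'employee', 'salary', 'wage', 'workforce', 'labor', 'compensation', 'occupational'],
--         'Financial Analysis': ['financial', 'revenue', 'profit', 'income', 'expense', 'accounting', 'fiscal'],
--         'Economic Analysis': ['economic', 'economics', 'market', 'industry', 'growth', 'trends'],
--         'Legal/Litigation': ['deposition', 'expert', 'litigation', 'dispute', 'damages', 'legal', 'testimony'],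
--         'Data Analytics': ['analysis', 'statistics', 'excel', 'report', 'overview', 'summary', 'insights'],
--         'Valuation': ['valuation', 'appraisal', 'worth', 'value', 'pricing'],
--         'Compliance': ['compliance', 'regulatory', 'audit', 'policy', 'rules'],
--         'Advisory': ['advisory', 'consulting', 'guidance', 'recommendation']
--     }
--
--     user_categories = defaultdict(int)
--
--     for topic, count in topics.items():
--         for category, keywords in categories.items():
--             if topic in keywords:
--                 user_categories[category] += count
--                 break
--
--     return dict(user_categories)
-- ===== SOURCE B (Python) =====
-- def categorize_topics(topics):
--     """Categorize topics into business areas"""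
--     categories = {
--         'Employment & HR': ['employment', 'employee', 'salary', 'wage', 'workforce', 'labor', 'compensation', 'occupational'],
--         'Financial Analysis': ['financial', 'revenue', 'profit', 'income', 'expense', 'accounting', 'fiscal'],
--         'Economic Analysis': ['economic', 'economics', 'market', 'industry', 'growth', 'trends'],
--         'Legal/Litigation': ['deposition', 'expert', 'litigation', 'dispute', 'damages', 'legal', 'testimony'],
--         'Data Analytics': ['analysis', 'statistics', 'excel', 'report', 'overview', 'summary', 'insights'],
--         'Valuation': ['valuation', 'appraisal', 'worth', 'value', 'pricing'],
--         'Compliance': ['compliance', 'regulatory', 'audit', 'policy', 'rules'],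
--         'Advisory': ['advisory', 'consulting', 'guidance', 'recommendation']
--     }
--
--     # stage 1: flat reverse index keyword -> category (keywords are disjoint)
--     keyword_to_category = {kw: cat for cat, kws in categories.items() for kw in kws}
--
--     # stage 2: resolve each topic to its category, dropping unknown topics
--     hits = [(keyword_to_category[t], c) for t, c in topics.items() if t in keyword_to_category]
--
--     # stage 3: aggregate the resolved pairs
--     totals = {}
--     for cat, c in hits:
--         totals[cat] = totals.get(cat, 0) + c
--     return totals
-- ===== Notes on version B (the rewrite author's own statement) =====
-- stated objective: faster
-- what changed: Replaces A's single loop with a nested per-topic scan of the categories table by three staged passes: build a flat keyword-to-category reverse index once, map/filter the topics to a list of (category, count) hits, then aggregate that list with get/overwrite updates.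
import Mathlib
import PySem

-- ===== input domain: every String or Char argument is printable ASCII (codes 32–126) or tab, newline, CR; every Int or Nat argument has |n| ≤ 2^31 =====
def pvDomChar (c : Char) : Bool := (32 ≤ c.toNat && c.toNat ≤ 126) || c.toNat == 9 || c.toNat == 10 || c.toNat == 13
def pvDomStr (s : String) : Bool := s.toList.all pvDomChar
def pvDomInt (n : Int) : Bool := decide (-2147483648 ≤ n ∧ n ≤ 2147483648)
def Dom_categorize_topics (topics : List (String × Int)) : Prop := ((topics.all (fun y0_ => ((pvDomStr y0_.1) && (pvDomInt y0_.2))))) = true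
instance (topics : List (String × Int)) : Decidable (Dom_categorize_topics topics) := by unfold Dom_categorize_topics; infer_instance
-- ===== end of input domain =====

-- B restructures A's single nested-scan loop into three staged passes: a flat
-- keyword→category reverse index built once, a map/filter of the topics into a
-- (category, count) hits list, and a separate aggregation loop over that list.


-- ===== PORT A =====
-- the fixed categories table, in source order
def pvCats : List (String × List String) :=
  [("Employment & HR", ["employment", "employee", "salary", "wage", "workforce", "labor", "compensation", "occupational"]),
   ("Financial Analysis", ["financial", "revenue", "profit", "income", "expense", "accounting", "fiscal"]),
   ("Economic Analysis", ["economic", "economics", "market", "industry", "growth", "trends"]),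
   ("Legal/Litigation", ["deposition", "expert", "litigation", "dispute", "damages", "legal", "testimony"]),
   ("Data Analytics", ["analysis", "statistics", "excel", "report", "overview", "summary", "insights"]),
   ("Valuation", ["valuation", "appraisal", "worth", "value", "pricing"]),
   ("Compliance", ["compliance", "regulatory", "audit", "policy", "rules"]),
   ("Advisory", ["advisory", "consulting", "guidance", "recommendation"])]

-- A's inner 'for category, keywords in categories.items(): if topic in keywords: … break'
def pvFindCat (t : String) : List (String × List String) → Option String
  | [] => none
  | (c, ks) :: rest => if ks.contains t then some c else pvFindCat t rest

def categorize_topics (topics : List (String × Int)) : List (String × Int) :=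
  (topics.foldl (fun (d : PySem.Dict String Int) p =>
      match pvFindCat p.1 pvCats with
      | some c => d.modify c 0 (· + p.2)   -- user_categories[category] += count
      | none => d) PySem.Dict.empty).items

-- ===== PORT B =====
-- stage 1: the dict comprehension {kw: cat for cat, kws in categories.items() for kw in kws}
def pvRevIndex : PySem.Dict String String :=
  pvCats.foldl (fun d p => p.2.foldl (fun d kw => d.insert kw p.1) d) PySem.Dict.empty

-- stage 2: [(keyword_to_category[t], c) for t, c in topics.items() if t in keyword_to_category]
def pvHits (topics : List (String × Int)) : List (String × Int) :=
  topics.filterMap (fun p => (pvRevIndex.get? p.1).map (fun cat => (cat, p.2)))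

-- stage 3: the aggregation loop 'for cat, c in hits: totals[cat] = totals.get(cat, 0) + c'
def pvAggregate : List (String × Int) → PySem.Dict String Int → PySem.Dict String Int
  | [], totals => totals
  | (cat, c) :: rest, totals => pvAggregate rest (totals.insert cat (totals.getD cat 0 + c))

def categorize_topics_alt (topics : List (String × Int)) : List (String × Int) :=
  (pvAggregate (pvHits topics) PySem.Dict.empty).items

-- ===== PRECONDITION & SPEC =====
def Spec_categorize_topics (topics : List (String × Int)) (out : List (String × Int)) : Prop := out = categorize_topics_alt topics
instance (topics : List (String × Int)) (out : List (String × Int)) : Decidable (Spec_categorize_topics topics out) := by unfold Spec_categorize_topics; infer_instance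

-- ===== CLAIM =====
def Claim_equal_categorize_topics : Prop := ∀ (topics : List (String × Int)), Dom_categorize_topics topics → Spec_categorize_topics topics (categorize_topics topics)

-- ===== LEMMAS AND PROOFS =====

-- the reverse index as built equals the flat association list of (keyword, category) pairs
set_option maxRecDepth 10000 in
theorem pvRevIndex_eq : pvRevIndex = PySem.Dict.mk (pvCats.flatMap (fun p => p.2.map (fun k => (k, p.1)))) := by decide

-- lookup in the flat list headed by one category's block: first-match within the block
theorem get_mk_block (t c : String) (ks : List String) (rest : List (String × String)) :
    (PySem.Dict.mk (ks.map (fun k => (k, c)) ++ rest)).get? t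
      = if ks.contains t then some c else (PySem.Dict.mk rest).get? t := by
  induction ks with
  | nil => simp
  | cons k ks ih =>
    simp only [List.map_cons, List.cons_append, PySem.Dict.get?_mk_cons, ih, List.contains_cons]
    by_cases h : (k == t) = true
    · simp [beq_iff_eq.mp h]
    · have ht : t ≠ k := fun e => h (by simp [e])
      simp [h, ht]

-- A's first-matching-category scan equals lookup in the flattened reverse list
theorem findCat_eq_get (t : String) (cs : List (String × List String)) :
    pvFindCat t cs = (PySem.Dict.mk (cs.flatMap (fun p => p.2.map (fun k => (k, p.1))))).get? t := by
  induction cs with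
  | nil => simp [pvFindCat, PySem.Dict.get?]
  | cons p rest ih =>
    obtain ⟨c, ks⟩ := p
    simp only [pvFindCat, List.flatMap_cons, get_mk_block, ih]

-- the staged aggregation over the hits list equals A's fold over the topics
theorem aggregate_hits_eq (topics : List (String × Int)) (d : PySem.Dict String Int) :
    pvAggregate (pvHits topics) d
      = topics.foldl (fun (d : PySem.Dict String Int) p =>
          match pvFindCat p.1 pvCats with
          | some c => d.modify c 0 (· + p.2)
          | none => d) d := by
  induction topics generalizing d with
  | nil => simp [pvHits, pvAggregate]
  | cons p ts ih =>
    simp only [pvHits, List.filterMap_cons, List.foldl_cons] at *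
    rw [findCat_eq_get, ← pvRevIndex_eq]
    cases h : pvRevIndex.get? p.1 with
    | none => simpa [pvHits] using ih d
    | some c =>
      simp only [Option.map_some, pvAggregate]
      have hstep : (d.modify c 0 (· + p.2)) = d.insert c (d.getD c 0 + p.2) := rfl
      rw [← hstep]
      simpa [pvHits] using ih (d.modify c 0 (· + p.2))

-- ===== VERDICT =====
theorem categorize_topics_spec : Claim_equal_categorize_topics := by
  intro topics _
  unfold Spec_categorize_topics categorize_topics categorize_topics_alt
  rw [aggregate_hits_eq]
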